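-- pv_equiv track=rewrite | github.com/matheushnobre/treinamento-maratona-2025 | dpm2025/04-fasezero/h.py | solve
-- ===== SOURCE A (Python) =====
-- def solve(n):
--     aux = [2**i for i in range(1, 64)]
--
--     if n in aux:
--         return n-1
--     b = list(bin(n)[2:])
--
--     i = 0
--     j = len(b) - 1
--
--     while i < j:
--         b[j] = b[i]
--         i += 1
--         j -= 1
--
--     aux = ''
--     for i in b: aux += i
--     ans = int(aux, 2)
--
--     if ans > n:
--         i = 0
--         j = len(b)-1
--         inicio=i+1
--         fim=j-1
--
--         while i <= j:
--             if b[i] == '1':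
--                 inicio = i+1
--                 fim = j-1
--             i += 1
--             j -= 1
--         for idx in range(inicio, fim+1):
--             b[idx] = '1'
--         b[inicio-1] = '0'
--         b[fim+1] = '0'
--
--         aux = ''
--         for i in b: aux += i
--
--         ans = int(aux, 2)
--
--     return ans
-- ===== SOURCE B (Python) =====
-- def solve(n):
--     s = bin(n)[2:]
--     L = len(s)
--     half = (L + 1) // 2
--     prefix = s[:half]
--     # mirror the first half onto the second half
--     pal = prefix + prefix[:L // 2][::-1]
--     v = int(pal, 2)
--     if v <= n:
--         return v
--     # palindrome too big: decrement the prefix as an integer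
--     pv = int(prefix, 2) - 1
--     if pv < 2 ** (half - 1):
--         # the prefix lost a bit: the answer is the all-ones number one bit shorter
--         return 2 ** (L - 1) - 1
--     p = bin(pv)[2:]
--     return int(p + p[:L // 2][::-1], 2)
-- ===== Notes on version B (the rewrite author's own statement) =====
-- stated objective: simpler
-- what changed: Replaces A's power-of-two membership table, in-place index-mirroring loop and bit-scan borrow loop (find lowest set bit of the half, clear it and its mirror, fill the middle with ones) by integer arithmetic on the prefix: build the palindrome by string slicing, and on overflow decrement the prefix as an integer and re-mirror, returning the closed-form all-ones value one bit shorter when the prefix loses a bit (this subsumes A's power-of-two special case).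
-- outside the precondition, e.g. on solve(-1): A raises ValueError, B raises ValueError
import Mathlib
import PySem

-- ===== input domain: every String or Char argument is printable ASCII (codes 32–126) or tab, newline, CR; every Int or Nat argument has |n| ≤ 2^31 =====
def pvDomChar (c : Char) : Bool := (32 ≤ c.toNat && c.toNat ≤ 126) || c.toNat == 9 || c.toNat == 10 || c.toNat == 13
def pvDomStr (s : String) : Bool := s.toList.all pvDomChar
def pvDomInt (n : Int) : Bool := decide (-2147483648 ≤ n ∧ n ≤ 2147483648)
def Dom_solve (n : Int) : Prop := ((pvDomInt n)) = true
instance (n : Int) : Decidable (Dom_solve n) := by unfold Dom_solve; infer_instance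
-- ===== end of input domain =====

-- B replaces A's power-of-two membership table, index-mirroring loop and bit-scan borrow loop
-- by integer arithmetic on the binary prefix (build the palindrome by slicing; on overflow
-- decrement the prefix as an integer and re-mirror, with a closed form when a bit is lost);
-- objective: simpler.

-- ===== PORT A =====

-- bin(n)[2:] for n ≥ 0, as a list of '0'/'1' chars (MSB first); hand port (bin is not in
-- PySem), exact for n ≥ 0.  bitsLE gives the bits LSB first; the first argument of the
-- auxiliary function is a structural fuel bound (n halves at every step, so n itself bounds
-- the number of steps).
def bitsLEA : Nat → Nat → List Char
  | _, 0 => []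
  | 0, _ + 1 => []
  | f + 1, n + 1 => (if (n + 1) % 2 = 1 then '1' else '0') :: bitsLEA f ((n + 1) / 2)

def bitsLE (n : Nat) : List Char := bitsLEA n n

def pyBin (n : Nat) : List Char :=
  if n = 0 then ['0'] else (bitsLE n).reverse

-- int(s, 2) for a string of '0'/'1' chars; hand port, exact there.
def parseBin (l : List Char) : Nat :=
  l.foldl (fun a c => 2 * a + (if c = '1' then 1 else 0)) 0

-- the while i < j: b[j] = b[i]; i += 1; j -= 1 loop (indices are in range at every call);
-- the fuel j - i bounds the number of iterations
def mirrorLoopF : Nat → List Char → Nat → Nat → List Char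
  | 0, b, _, _ => b
  | f + 1, b, i, j => if i < j then mirrorLoopF f (b.set j (b.getD i ' ')) (i + 1) (j - 1) else b

def mirrorLoop (b : List Char) (i j : Nat) : List Char := mirrorLoopF (j - i) b i j

-- the while i <= j loop computing (inicio, fim); fuel (j - i + 1).toNat bounds the iterations
def scanLoopF : Nat → List Char → Int → Int → Int → Int → Int × Int
  | 0, _, _, _, ini, fim => (ini, fim)
  | f + 1, b, i, j, ini, fim =>
    if i ≤ j then
      if PySem.List.pyGetD b i ' ' = '1' then scanLoopF f b (i + 1) (j - 1) (i + 1) (j - 1)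
      else scanLoopF f b (i + 1) (j - 1) ini fim
    else (ini, fim)

def scanLoop (b : List Char) (i j ini fim : Int) : Int × Int :=
  scanLoopF (j - i + 1).toNat b i j ini fim

-- for idx in range(inicio, fim+1): b[idx] = '1'
def fillOnes (b : List Char) (inicio fim : Int) : List Char :=
  (PySem.List.pyRange inicio (fim + 1) 1).foldl
    (fun l idx => PySem.List.pySetD l idx '1') b

def solve (n : Int) : Int :=
  let aux : List Int := (PySem.List.pyRange 1 64 1).map (fun i => (2 : Int) ^ i.toNat)
  if n ∈ aux then n - 1
  else
    let b := pyBin n.toNat        -- list(bin(n)[2:]); exact for n ≥ 0 (Pre_)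
    let b := mirrorLoop b 0 (b.length - 1)
    let aux2 := b.foldl (fun s c => s ++ [c]) ([] : List Char)  -- aux = ''; for i in b: aux += i
    let ans : Int := parseBin aux2
    if ans > n then
      let p := scanLoop b 0 ((b.length : Int) - 1) 1 ((b.length : Int) - 1 - 1)
      let inicio := p.1
      let fim := p.2
      let b := fillOnes b inicio fim
      let b := PySem.List.pySetD b (inicio - 1) '0'
      let b := PySem.List.pySetD b (fim + 1) '0'
      let aux3 := b.foldl (fun s c => s ++ [c]) ([] : List Char)
      (parseBin aux3 : Int)
    else ans

-- ===== PORT B =====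
def solve_alt (n : Int) : Int :=
  let s := pyBin n.toNat          -- bin(n)[2:]; exact for n ≥ 0 (Pre_)
  let L := s.length
  let half := (L + 1) / 2
  let pre := s.take half
  let pal := pre ++ (pre.take (L / 2)).reverse
  let v : Int := parseBin pal
  if v ≤ n then v
  else
    let pv : Int := (parseBin pre : Int) - 1
    if pv < 2 ^ (half - 1) then 2 ^ (L - 1) - 1
    else
      let p := pyBin pv.toNat
      (parseBin (p ++ (p.take (L / 2)).reverse) : Int)

-- ===== PRECONDITION & SPEC =====
-- Pre_ excludes exactly the negative inputs, where A raises ValueError (the minus sign makes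
-- the binary-literal reparse fail); B raises there likewise.
def Pre_solve (n : Int) : Prop := 0 ≤ n
instance (n : Int) : Decidable (Pre_solve n) := by unfold Pre_solve; infer_instance
def pvWitness_solve : Int := (6)

def Spec_solve (n : Int) (out : Int) : Prop := out = solve_alt n
instance (n : Int) (out : Int) : Decidable (Spec_solve n out) := by unfold Spec_solve; infer_instance

-- ===== CLAIM (what is proved, stated in full; the proofs are below) =====
def Claim_equal_solve : Prop := ∀ (n : Int), Dom_solve n → Pre_solve n → Spec_solve n (solve n)

-- ===== LEMMAS AND PROOFS =====

theorem parse_go (l : List Char) (a : Nat) :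
    l.foldl (fun a c => 2 * a + (if c = '1' then 1 else 0)) a
      = a * 2 ^ l.length + parseBin l := by
  induction l generalizing a with
  | nil => simp [parseBin]
  | cons c l ih =>
    simp only [List.foldl_cons, List.length_cons, parseBin] at *
    rw [ih, ih (2 * 0 + _)]
    ring

theorem parse_append (l1 l2 : List Char) :
    parseBin (l1 ++ l2) = parseBin l1 * 2 ^ l2.length + parseBin l2 := by
  unfold parseBin
  rw [List.foldl_append, parse_go]
  rfl

theorem parse_replicate_zero (t : Nat) : parseBin (List.replicate t '0') = 0 := by
  induction t with
  | zero => rfl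
  | succ t ih =>
    rw [List.replicate_succ]
    show parseBin ([_] ++ _) = 0
    rw [parse_append, ih]; simp [parseBin]

theorem parse_cons (c : Char) (l : List Char) :
    parseBin (c :: l) = (if c = '1' then 1 else 0) * 2 ^ l.length + parseBin l := by
  have := parse_append [c] l
  simpa [parseBin] using this

theorem parse_replicate_one (t : Nat) : parseBin (List.replicate t '1') = 2 ^ t - 1 := by
  induction t with
  | zero => rfl
  | succ t ih =>
    rw [List.replicate_succ, parse_cons, ih]
    simp [List.length_replicate]
    have : (1:Nat) ≤ 2 ^ t := Nat.one_le_two_pow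
    ring_nf
    omega

theorem parse_lt (l : List Char) : parseBin l < 2 ^ l.length := by
  induction l with
  | nil => simp [parseBin]
  | cons c l ih =>
    rw [parse_cons]
    simp only [List.length_cons, pow_succ]
    split_ifs <;> omega

theorem parse_ge (l : List Char) (h : l.head? = some '1') :
    2 ^ (l.length - 1) ≤ parseBin l := by
  cases l with
  | nil => simp at h
  | cons c l =>
    simp at h
    subst h
    rw [parse_cons]
    simp
theorem bitsLEA_congr : ∀ (f1 : Nat), ∀ (f2 n : Nat), n ≤ f1 → n ≤ f2 →
    bitsLEA f1 n = bitsLEA f2 n := by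
  intro f1
  induction f1 with
  | zero =>
    intro f2 n h1 h2
    have : n = 0 := by omega
    subst this
    cases f2 <;> rfl
  | succ f1 ih =>
    intro f2 n h1 h2
    cases n with
    | zero => cases f2 <;> rfl
    | succ n =>
      cases f2 with
      | zero => omega
      | succ f2 =>
        show _ :: bitsLEA f1 ((n + 1) / 2) = _ :: bitsLEA f2 ((n + 1) / 2)
        rw [ih f2 ((n + 1) / 2) (by omega) (by omega)]

theorem bitsLE_zero : bitsLE 0 = [] := rfl

theorem bitsLE_pos (n : Nat) (h : n ≠ 0) :
    bitsLE n = (if n % 2 = 1 then '1' else '0') :: bitsLE (n / 2) := by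
  cases n with
  | zero => exact absurd rfl h
  | succ n =>
    show _ :: bitsLEA n ((n + 1) / 2) = _ :: bitsLEA ((n + 1) / 2) ((n + 1) / 2)
    rw [bitsLEA_congr n ((n + 1) / 2) ((n + 1) / 2) (by omega) (by omega)]

theorem parse_rev_bitsLE (n : Nat) : parseBin (bitsLE n).reverse = n := by
  induction n using Nat.strong_induction_on with
  | _ n ih =>
    by_cases h : n = 0
    · subst h; rw [bitsLE_zero]; rfl
    · rw [bitsLE_pos n h]
      simp only [List.reverse_cons]
      rw [parse_append, ih (n / 2) (Nat.div_lt_self (Nat.pos_of_ne_zero h) (by norm_num))]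
      have h2 : n % 2 = 0 ∨ n % 2 = 1 := by omega
      rcases h2 with h2 | h2 <;> simp [parseBin, h2] <;> omega

theorem parse_pyBin (n : Nat) : parseBin (pyBin n) = n := by
  unfold pyBin
  split_ifs with h
  · subst h; rfl
  · exact parse_rev_bitsLE n

theorem bitsLE_ne_nil (n : Nat) (h : n ≠ 0) : bitsLE n ≠ [] := by
  rw [bitsLE_pos n h]; simp

theorem pyBin_ne_nil (n : Nat) : pyBin n ≠ [] := by
  unfold pyBin
  split_ifs with h
  · simp
  · simpa using bitsLE_ne_nil n h

theorem bitsLE_binary (n : Nat) : ∀ c ∈ bitsLE n, c = '0' ∨ c = '1' := by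
  induction n using Nat.strong_induction_on with
  | _ n ih =>
    by_cases h : n = 0
    · subst h; rw [bitsLE_zero]; simp
    · rw [bitsLE_pos n h]
      intro c hc
      rcases List.mem_cons.mp hc with hc | hc
      · subst hc; split_ifs <;> simp
      · exact ih (n / 2) (Nat.div_lt_self (Nat.pos_of_ne_zero h) (by norm_num)) c hc

theorem pyBin_binary (n : Nat) : ∀ c ∈ pyBin n, c = '0' ∨ c = '1' := by
  unfold pyBin
  split_ifs with h
  · simp
  · intro c hc
    exact bitsLE_binary n c (List.mem_reverse.mp hc)

theorem bitsLE_getLast (n : Nat) (h : n ≠ 0) : (bitsLE n).getLast? = some '1' := by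
  induction n using Nat.strong_induction_on with
  | _ n ih =>
    by_cases h2 : n / 2 = 0
    · have h3 : n = 1 := by omega
      subst h3
      rw [bitsLE_pos 1 (by norm_num)]
      simp [bitsLE_zero]
    · rw [bitsLE_pos n h]
      have hcc : ∀ (c : Char) (l : List Char), l ≠ [] → (c :: l).getLast? = l.getLast? := by
        intro c l hl
        cases l with
        | nil => exact absurd rfl hl
        | cons y ys => rw [List.getLast?_cons_cons]
      rw [hcc _ _ (bitsLE_ne_nil _ h2)]
      exact ih (n / 2) (Nat.div_lt_self (Nat.pos_of_ne_zero h) (by norm_num)) h2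

theorem pyBin_head (n : Nat) (h : n ≠ 0) : (pyBin n).head? = some '1' := by
  unfold pyBin
  rw [if_neg h, List.head?_reverse]
  exact bitsLE_getLast n h

theorem pyBin_parse (l : List Char) (hh : l.head? = some '1')
    (hb : ∀ c ∈ l, c = '0' ∨ c = '1') : pyBin (parseBin l) = l := by
  suffices hs : ∀ l : List Char, l.head? = some '1' → (∀ c ∈ l, c = '0' ∨ c = '1') →
      bitsLE (parseBin l) = l.reverse ∧ parseBin l ≠ 0 by
    obtain ⟨h1, h2⟩ := hs l hh hb
    unfold pyBin
    rw [if_neg h2, h1, List.reverse_reverse]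
  intro l
  induction l using List.reverseRecOn with
  | nil => simp
  | append_singleton ys c ih =>
    intro hh hb
    rw [parse_append]
    cases ys with
    | nil =>
      simp at hh
      subst hh
      simp [parseBin, bitsLE_pos 1 (by norm_num), bitsLE_zero]
    | cons y ys' =>
      have hh' : (y :: ys').head? = some '1' := by simpa using hh
      have hb' : ∀ c' ∈ y :: ys', c' = '0' ∨ c' = '1' := by
        intro c' hc'; exact hb c' (List.mem_append_left _ hc')
      obtain ⟨ih1, ih2⟩ := ih hh' hb'
      have hcb : c = '0' ∨ c = '1' := hb c (by simp)
      have hge : 1 ≤ parseBin (y :: ys') := Nat.one_le_iff_ne_zero.mpr ih2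
      set P := parseBin (y :: ys') with hP
      have hbit : parseBin [c] = if c = '1' then 1 else 0 := by
        simp [parseBin]
      constructor
      · have hne : P * 2 ^ ([c].length) + parseBin [c] ≠ 0 := by
          simp; rcases hcb with h | h <;> simp [h] <;> omega
        rw [bitsLE_pos _ hne]
        have hmod : (P * 2 ^ ([c].length) + parseBin [c]) % 2 = (if c = '1' then 1 else 0) := by
          simp [hbit]; rcases hcb with h | h <;> simp [h] <;> omega
        have hdiv : (P * 2 ^ ([c].length) + parseBin [c]) / 2 = P := by
          simp [hbit]; rcases hcb with h | h <;> simp [h] <;> omega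
        rw [hmod, hdiv, ih1]
        simp
        rcases hcb with h | h <;> simp [h]
      · simp [hbit]
        rcases hcb with h | h <;> simp [h] <;> omega

theorem pyBin_two_pow (t : Nat) : pyBin (2 ^ t) = '1' :: List.replicate t '0' := by
  have h : parseBin ('1' :: List.replicate t '0') = 2 ^ t := by
    rw [parse_cons, parse_replicate_zero]
    simp
  rw [← h]
  apply pyBin_parse
  · simp
  · intro c hc
    rcases List.mem_cons.mp hc with hc | hc
    · right; exact hc
    · left; exact List.eq_of_mem_replicate hc

theorem pyBin_length_bounds (n : Nat) (h : n ≠ 0) :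
    2 ^ ((pyBin n).length - 1) ≤ n ∧ n < 2 ^ (pyBin n).length := by
  constructor
  · have := parse_ge (pyBin n) (pyBin_head n h)
    rwa [parse_pyBin] at this
  · have := parse_lt (pyBin n)
    rwa [parse_pyBin] at this
theorem mirrorLoopF_congr : ∀ (f1 : Nat), ∀ (f2 : Nat) (b : List Char) (i j : Nat),
    j - i ≤ f1 → j - i ≤ f2 → mirrorLoopF f1 b i j = mirrorLoopF f2 b i j := by
  intro f1
  induction f1 with
  | zero =>
    intro f2 b i j h1 h2
    cases f2 with
    | zero => rfl
    | succ f2 =>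
      show b = if i < j then _ else b
      rw [if_neg (by omega)]
  | succ f1 ih =>
    intro f2 b i j h1 h2
    cases f2 with
    | zero =>
      show (if i < j then _ else b) = b
      rw [if_neg (by omega)]
    | succ f2 =>
      show (if i < j then mirrorLoopF f1 _ _ _ else b) = if i < j then mirrorLoopF f2 _ _ _ else b
      by_cases h : i < j
      · rw [if_pos h, if_pos h, ih f2 _ (i + 1) (j - 1) (by omega) (by omega)]
      · rw [if_neg h, if_neg h]

theorem mirrorLoop_eq (b : List Char) (i j : Nat) :
    mirrorLoop b i j = if i < j then mirrorLoop (b.set j (b.getD i ' ')) (i + 1) (j - 1) else b := by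
  by_cases h : i < j
  · rw [if_pos h]
    unfold mirrorLoop
    rw [show j - i = (j - i - 1) + 1 from by omega]
    show (if i < j then mirrorLoopF (j - i - 1) _ _ _ else b) = _
    rw [if_pos h]
    exact mirrorLoopF_congr (j - i - 1) (j - 1 - (i + 1)) _ (i + 1) (j - 1) (by omega) (by omega)
  · rw [if_neg h]
    unfold mirrorLoop
    rw [show j - i = 0 from by omega]
    rfl

theorem scanLoopF_congr : ∀ (f1 : Nat), ∀ (f2 : Nat) (b : List Char) (i j ini fim : Int),
    (j - i + 1).toNat ≤ f1 → (j - i + 1).toNat ≤ f2 →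
    scanLoopF f1 b i j ini fim = scanLoopF f2 b i j ini fim := by
  intro f1
  induction f1 with
  | zero =>
    intro f2 b i j ini fim h1 h2
    cases f2 with
    | zero => rfl
    | succ f2 =>
      show (ini, fim) = if i ≤ j then _ else (ini, fim)
      rw [if_neg (by omega)]
  | succ f1 ih =>
    intro f2 b i j ini fim h1 h2
    cases f2 with
    | zero =>
      show (if i ≤ j then _ else (ini, fim)) = (ini, fim)
      rw [if_neg (by omega)]
    | succ f2 =>
      show (if i ≤ j then (if _ = '1' then scanLoopF f1 _ _ _ _ _ else scanLoopF f1 _ _ _ _ _) else _)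
          = if i ≤ j then (if _ = '1' then scanLoopF f2 _ _ _ _ _ else scanLoopF f2 _ _ _ _ _) else _
      by_cases h : i ≤ j
      · rw [if_pos h, if_pos h]
        by_cases hc : PySem.List.pyGetD b i ' ' = '1'
        · rw [if_pos hc, if_pos hc, ih f2 b (i + 1) (j - 1) _ _ (by omega) (by omega)]
        · rw [if_neg hc, if_neg hc, ih f2 b (i + 1) (j - 1) _ _ (by omega) (by omega)]
      · rw [if_neg h, if_neg h]

theorem scanLoop_eq (b : List Char) (i j ini fim : Int) :
    scanLoop b i j ini fim =
      if i ≤ j then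
        (if PySem.List.pyGetD b i ' ' = '1' then scanLoop b (i + 1) (j - 1) (i + 1) (j - 1)
         else scanLoop b (i + 1) (j - 1) ini fim)
      else (ini, fim) := by
  by_cases h : i ≤ j
  · rw [if_pos h]
    unfold scanLoop
    rw [show (j - i + 1).toNat = ((j - i + 1).toNat - 1) + 1 from by omega]
    show (if i ≤ j then (if _ then scanLoopF ((j - i + 1).toNat - 1) _ _ _ _ _
        else scanLoopF ((j - i + 1).toNat - 1) _ _ _ _ _) else _) = _
    rw [if_pos h]
    by_cases hc : PySem.List.pyGetD b i ' ' = '1'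
    · rw [if_pos hc, if_pos hc]
      exact scanLoopF_congr _ _ b (i + 1) (j - 1) _ _ (by omega) (by omega)
    · rw [if_neg hc, if_neg hc]
      exact scanLoopF_congr _ _ b (i + 1) (j - 1) _ _ (by omega) (by omega)
  · rw [if_neg h]
    unfold scanLoop
    rw [show (j - i + 1).toNat = 0 from by omega]
    rfl

theorem mirrorLoop_closed (L : Nat) : ∀ (d i j : Nat), ∀ b : List Char, j - i ≤ d → b.length = L →
    i + j + 1 = L → i ≤ j + 1 →
    (∀ m, m < L → j < m → b[m]? = b[L - 1 - m]?) →
    mirrorLoop b i j = b.take (L - max i (L / 2)) ++ (b.take (max i (L / 2))).reverse := by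
  intro d
  induction d with
  | zero =>
    intro i j b hd hL hij hle hinv
    rw [mirrorLoop_eq, if_neg (by omega : ¬ i < j), (by omega : max i (L / 2) = i)]
    conv_lhs => rw [← List.take_append_drop (L - i) b]
    congr 1
    apply List.ext_getElem?
    intro k
    by_cases hk : k < i
    · rw [List.getElem?_drop, List.getElem?_reverse (by simp [hL]; omega),
          List.getElem?_take_of_lt (by simp [hL]; omega)]
      rw [hinv (L - i + k) (by omega) (by omega)]
      rw [show L - 1 - (L - i + k) = (b.take i).length - 1 - k from by simp [hL]; omega]
    · rw [List.getElem?_eq_none (by simp [hL]; omega),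
          List.getElem?_eq_none (by simp [hL]; omega)]
  | succ d ih =>
    intro i j b hd hL hij hle hinv
    by_cases hlt : i < j
    · rw [mirrorLoop_eq, if_pos hlt]
      have hinv' : ∀ m, m < L → j - 1 < m →
          (b.set j (b.getD i ' '))[m]? = (b.set j (b.getD i ' '))[L - 1 - m]? := by
        intro m hm hjm
        by_cases hmj : m = j
        · rw [hmj]
          rw [List.getElem?_set_self (by simp [hL]; omega),
              show L - 1 - j = i from by omega,
              List.getElem?_set_ne (by omega : j ≠ i),
              List.getD_eq_getElem _ _ (by omega),
              List.getElem?_eq_getElem (by omega)]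
        · rw [List.getElem?_set_ne (by omega : j ≠ m),
              List.getElem?_set_ne (by omega : j ≠ L - 1 - m)]
          exact hinv m hm (by omega)
      rw [ih (i + 1) (j - 1) _ (by omega) (by simp [hL]) (by omega) (by omega) hinv']
      rw [(by omega : max i (L / 2) = L / 2), (by omega : max (i + 1) (L / 2) = L / 2)]
      rw [List.take_set_of_le (by omega), List.take_set_of_le (by omega)]
    · rw [mirrorLoop_eq, if_neg hlt, (by omega : max i (L / 2) = i)]
      conv_lhs => rw [← List.take_append_drop (L - i) b]
      congr 1
      apply List.ext_getElem?
      intro k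
      by_cases hk : k < i
      · rw [List.getElem?_drop, List.getElem?_reverse (by simp [hL]; omega),
            List.getElem?_take_of_lt (by simp [hL]; omega)]
        rw [hinv (L - i + k) (by omega) (by omega)]
        rw [show L - 1 - (L - i + k) = (b.take i).length - 1 - k from by simp [hL]; omega]
      · rw [List.getElem?_eq_none (by simp [hL]; omega),
            List.getElem?_eq_none (by simp [hL]; omega)]

theorem mirrorLoop_top (b : List Char) (h : b.length ≠ 0) :
    mirrorLoop b 0 (b.length - 1)
      = b.take ((b.length + 1) / 2) ++ (b.take (b.length / 2)).reverse := by
  have := mirrorLoop_closed b.length (b.length - 1) 0 (b.length - 1) b (by omega) rfl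
    (by omega) (by omega) (by intro m hm hm2; omega)
  rw [this]
  congr 2
  omega
theorem scanLoop_none (b : List Char) : ∀ (d : Nat) (i j ini fim : Int), (j - i + 1).toNat ≤ d →
    (∀ m : Int, i ≤ m → 2 * m ≤ i + j → PySem.List.pyGetD b m ' ' ≠ '1') →
    scanLoop b i j ini fim = (ini, fim) := by
  intro d
  induction d with
  | zero =>
    intro i j ini fim hd hno
    rw [scanLoop_eq, if_neg (by omega)]
  | succ d ih =>
    intro i j ini fim hd hno
    by_cases hij : i ≤ j
    · rw [scanLoop_eq, if_pos hij, if_neg (hno i le_rfl (by omega))]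
      exact ih _ _ _ _ (by omega) (fun m h1 h2 => hno m (by omega) (by omega))
    · rw [scanLoop_eq, if_neg hij]

theorem scanLoop_last (b : List Char) (k : Int) : ∀ (d : Nat) (i j ini fim : Int),
    (j - i + 1).toNat ≤ d →
    i ≤ k → 2 * k ≤ i + j → PySem.List.pyGetD b k ' ' = '1' →
    (∀ m : Int, k < m → 2 * m ≤ i + j → PySem.List.pyGetD b m ' ' ≠ '1') →
    scanLoop b i j ini fim = (k + 1, i + j - k - 1) := by
  intro d
  induction d with
  | zero =>
    intro i j ini fim hd hik hkj hk hno
    omega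
  | succ d ih =>
    intro i j ini fim hd hik hkj hk hno
    have hij : i ≤ j := by omega
    by_cases hc : i = k
    · subst hc
      rw [scanLoop_eq, if_pos hij, if_pos hk]
      rw [scanLoop_none b d (i + 1) (j - 1) _ _ (by omega)
        (fun m h1 h2 => hno m (by omega) (by omega))]
      congr 1
      omega
    · rw [scanLoop_eq, if_pos hij]
      have hrec := ih (i + 1) (j - 1) (i + 1) (j - 1) (by omega) (by omega) (by omega) hk
        (fun m h1 h2 => hno m h1 (by omega))
      have hrec2 := ih (i + 1) (j - 1) ini fim (by omega) (by omega) (by omega) hk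
        (fun m h1 h2 => hno m h1 (by omega))
      split_ifs with hone
      · rw [hrec]; congr 1 <;> omega
      · rw [hrec2]; congr 1 <;> omega

theorem foldl_pySetD_length (l : List Int) : ∀ b : List Char,
    (l.foldl (fun acc idx => PySem.List.pySetD acc idx '1') b).length = b.length := by
  induction l with
  | nil => intro b; rfl
  | cons x l ih =>
    intro b
    rw [List.foldl_cons, ih, PySem.List.length_pySetD]

theorem fillOnes_length (b : List Char) (a c : Int) :
    (fillOnes b a c).length = b.length := by
  unfold fillOnes
  exact foldl_pySetD_length _ b

theorem fillOnes_step (b : List Char) (a c : Int) (h : a ≤ c) :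
    fillOnes b a c = fillOnes (PySem.List.pySetD b a '1') (a + 1) c := by
  unfold fillOnes
  rw [PySem.List.pyRange_one_cons (by omega), List.foldl_cons]

theorem fillOnes_nil (b : List Char) (a c : Int) (h : c < a) :
    fillOnes b a c = b := by
  unfold fillOnes
  rw [PySem.List.pyRange_one_eq_nil (by omega), List.foldl_nil]

theorem fillOnes_getElem (c : Int) (m : Nat) :
    ∀ (d : Nat) (a : Int) (b : List Char), (c + 1 - a).toNat ≤ d → 0 ≤ a → m < b.length →
    (fillOnes b a c)[m]? = if a ≤ (m : Int) ∧ (m : Int) ≤ c then some '1' else b[m]? := by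
  intro d
  induction d with
  | zero =>
    intro a b hd ha hm
    rw [fillOnes_nil b a c (by omega), if_neg (by omega)]
  | succ d ih =>
    intro a b hd ha hm
    by_cases hac : a ≤ c
    · rw [fillOnes_step b a c hac]
      rw [ih (a + 1) _ (by omega) (by omega) (by rw [PySem.List.length_pySetD]; exact hm)]
      rw [PySem.List.pySetD_of_nonneg b '1' ha]
      by_cases h1 : a = (m : Int)
      · have hma : a.toNat = m := by omega
        rw [if_neg (by omega), if_pos (by omega), hma,
            List.getElem?_set_self hm]
      · rw [List.getElem?_set_ne (by omega)]
        split_ifs with h2 h3 <;> first | rfl | omega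
    · rw [fillOnes_nil b a c (by omega), if_neg (by omega)]

theorem split_last_one (l : List Char) (hb : ∀ c ∈ l, c = '0' ∨ c = '1')
    (h1 : '1' ∈ l) : ∃ q t, l = q ++ '1' :: List.replicate t '0' := by
  induction l using List.reverseRecOn with
  | nil => simp at h1
  | append_singleton ys c ih =>
    by_cases hc : c = '1'
    · exact ⟨ys, 0, by simp [hc]⟩
    · have hc0 : c = '0' := by
        rcases hb c (by simp) with h | h
        · exact h
        · exact absurd h hc
      have h1' : '1' ∈ ys := by
        rcases List.mem_append.mp h1 with h | h
        · exact h
        · simp at h; exact absurd h.symm hc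
      obtain ⟨q, t, hqt⟩ := ih (fun c' hc' => hb c' (List.mem_append_left _ hc')) h1'
      refine ⟨q, t + 1, ?_⟩
      rw [hqt, hc0]
      simp [List.replicate_succ']
theorem getElem?_mid (q : List Char) (c e : Char) (t i : Nat) :
    (q ++ c :: List.replicate t e)[i]? =
      if i < q.length then q[i]?
      else if i = q.length then some c
      else if i < q.length + 1 + t then some e
      else none := by
  by_cases h1 : i < q.length
  · rw [List.getElem?_append_left h1, if_pos h1]
  · rw [List.getElem?_append_right (by omega)]
    by_cases h2 : i = q.length
    · rw [if_neg h1, if_pos h2, h2]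
      simp
    · rw [if_neg h1, if_neg h2]
      have h3 : i - q.length = (i - q.length - 1) + 1 := by omega
      rw [h3]
      simp only [List.getElem?_cons_succ, List.getElem?_replicate]
      split_ifs <;> first | rfl | omega

theorem getElem?_mirror (u : List Char) (L i : Nat) (hL : u.length = (L + 1) / 2) :
    (u ++ (u.take (L / 2)).reverse)[i]? =
      if i < (L + 1) / 2 then u[i]?
      else if i < L then u[L - 1 - i]?
      else none := by
  have hlen : (u.take (L / 2)).length = L / 2 := by simp [hL]; omega
  by_cases h1 : i < (L + 1) / 2
  · rw [List.getElem?_append_left (by omega), if_pos h1]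
  · rw [List.getElem?_append_right (by omega), if_neg h1]
    by_cases h2 : i < L
    · rw [if_pos h2]
      rw [List.getElem?_reverse (by omega)]
      rw [hlen, hL]
      rw [List.getElem?_take_of_lt (by omega)]
      rw [show L / 2 - 1 - (i - (L + 1) / 2) = L - 1 - i from by omega]
    · rw [if_neg h2, List.getElem?_eq_none]
      simp [hlen, hL]
      omega

theorem surgery (q : List Char) (t L : Nat) (hq : q ≠ []) (hL : 2 ≤ L)
    (hhalf : q.length + 1 + t = (L + 1) / 2) :
    PySem.List.pySetD (PySem.List.pySetD
        (fillOnes ((q ++ '1' :: List.replicate t '0') ++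
            (((q ++ '1' :: List.replicate t '0')).take (L / 2)).reverse)
          ((q.length : Int) + 1) ((L : Int) - 2 - (q.length : Int)))
        (q.length : Int) '0') ((L : Int) - 1 - (q.length : Int)) '0'
      = (q ++ '0' :: List.replicate t '1') ++
          ((q ++ '0' :: List.replicate t '1').take (L / 2)).reverse := by
  set k := q.length with hk
  have hkk : 1 ≤ k := by
    cases q with
    | nil => exact absurd rfl hq
    | cons a l => simp [hk]
  set half := (L + 1) / 2 with hhalf2
  have hpre_len : (q ++ '1' :: List.replicate t '0').length = half := by simp; omega
  have hp'_len : (q ++ '0' :: List.replicate t '1').length = half := by simp; omega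
  have hpal_len : ((q ++ '1' :: List.replicate t '0') ++
      (((q ++ '1' :: List.replicate t '0')).take (L / 2)).reverse).length = L := by
    simp [hpre_len]
    omega
  rw [PySem.List.pySetD_of_nonneg _ '0' (by omega), PySem.List.pySetD_of_nonneg _ '0' (by omega)]
  apply List.ext_getElem?
  intro i
  rw [show ((L : Int) - 1 - (k : Int)).toNat = L - 1 - k from by omega,
      show ((k : Int)).toNat = k from by omega]
  have hlen_fill : (fillOnes ((q ++ '1' :: List.replicate t '0') ++
      (((q ++ '1' :: List.replicate t '0')).take (L / 2)).reverse)
        ((k : Int) + 1) ((L : Int) - 2 - (k : Int))).length = L := by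
    rw [fillOnes_length, hpal_len]
  by_cases hiL : i < L
  · -- in range
    have hkL : 2 * k ≤ L - 1 := by omega
    by_cases hm1 : i = L - 1 - k
    · -- outer set hits
      rw [hm1, List.getElem?_set_self (by rw [List.length_set, hlen_fill]; omega)]
      rw [getElem?_mirror _ L _ (by rw [hp'_len])]
      by_cases hsm : L - 1 - k < half
      · rw [if_pos hsm, getElem?_mid]
        -- here necessarily L - 1 - k = k (odd length, k exactly in the middle)
        have hdiag : L - 1 - k = k := by omega
        rw [if_neg (by omega), if_pos (by omega)]
      · rw [if_neg hsm, if_pos (by omega)]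
        rw [show L - 1 - (L - 1 - k) = k from by omega]
        rw [getElem?_mid, if_neg (by omega), if_pos (by omega)]
    · rw [List.getElem?_set_ne (show L - 1 - k ≠ i from by omega)]
      by_cases hm2 : i = k
      · rw [hm2, List.getElem?_set_self (by rw [hlen_fill]; omega)]
        rw [getElem?_mirror _ L _ (by rw [hp'_len])]
        rw [if_pos (by omega), getElem?_mid, if_neg (by omega), if_pos (by omega)]
      · rw [List.getElem?_set_ne (show k ≠ i from by omega)]
        rw [fillOnes_getElem ((L : Int) - 2 - (k : Int)) i L ((k : Int) + 1) _ (by omega) (by omega)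
          (by rw [hpal_len]; omega)]
        rw [getElem?_mirror _ L _ (by rw [hpre_len]),
            getElem?_mirror _ L _ (by rw [hp'_len])]
        by_cases hf : (k : Int) + 1 ≤ (i : Int) ∧ (i : Int) ≤ (L : Int) - 2 - (k : Int)
        · -- fill range: rhs must be '1'
          rw [if_pos hf]
          by_cases hih : i < half
          · rw [if_pos hih, getElem?_mid, if_neg (by omega), if_neg (by omega),
                if_pos (by omega)]
          · rw [if_neg hih, if_pos (by omega), getElem?_mid,
                if_neg (by omega), if_neg (by omega), if_pos (by omega)]
        · -- untouched: i < k or i > L-1-k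
          rw [if_neg hf]
          have hcase : i < k ∨ (L - 1 - k < i ∧ half ≤ i) := by omega
          by_cases hih : i < half
          · have hik : i < k := by omega
            rw [if_pos hih, if_pos hih, getElem?_mid, getElem?_mid,
                if_pos (by omega), if_pos (by omega)]
          · have hio : L - 1 - k < i := by omega
            rw [if_neg hih, if_neg hih, if_pos (by omega), if_pos (by omega),
                getElem?_mid, getElem?_mid, if_pos (by omega), if_pos (by omega)]
  · -- out of range: both none
    have hrhs_len : ((q ++ '0' :: List.replicate t '1') ++
        ((q ++ '0' :: List.replicate t '1').take (L / 2)).reverse).length = L := by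
      simp
      omega
    rw [List.getElem?_eq_none (by rw [List.length_set, List.length_set, hlen_fill]; omega),
        List.getElem?_eq_none (by rw [hrhs_len]; omega)]
theorem aux_mem (z : Int) :
    z ∈ (PySem.List.pyRange 1 64 1).map (fun i => (2 : Int) ^ i.toNat) ↔
      ∃ k : Nat, 1 ≤ k ∧ k ≤ 63 ∧ z = 2 ^ k := by
  rw [List.mem_map]
  constructor
  · rintro ⟨i, hi, rfl⟩
    rw [PySem.List.mem_pyRange_one] at hi
    exact ⟨i.toNat, by omega, by omega, by rw [show i.toNat = i.toNat from rfl]⟩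
  · rintro ⟨k, h1, h2, rfl⟩
    refine ⟨(k : Int), ?_, by simp⟩
    rw [PySem.List.mem_pyRange_one]
    omega

theorem main_eq : ∀ (n : Int), Dom_solve n → Pre_solve n → solve n = solve_alt n := by
  intro n hdom hpre
  have hdom' : n ≤ 2147483648 := by
    unfold Dom_solve pvDomInt at hdom
    simp at hdom
    exact hdom.2
  obtain ⟨m, rfl⟩ : ∃ m : Nat, n = (m : Int) := ⟨n.toNat, (Int.toNat_of_nonneg hpre).symm⟩
  have hm31 : m ≤ 2147483648 := by omega
  by_cases haux : (m : Int) ∈ (PySem.List.pyRange 1 64 1).map (fun i => (2 : Int) ^ i.toNat)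
  · obtain ⟨k, hk1, hk63, hkeq⟩ := (aux_mem _).mp haux
    have hmk : m = 2 ^ k := by exact_mod_cast hkeq
    have hk31 : k ≤ 31 := by
      by_contra hgt
      have h1 : 2 ^ 32 ≤ 2 ^ k := Nat.pow_le_pow_right (by norm_num) (by omega)
      have h2 : (2 : Nat) ^ 32 = 4294967296 := by norm_num
      omega
    subst hmk
    interval_cases k <;> decide
  · by_cases hm0 : m = 0
    · subst hm0; decide
    -- main case: m ≥ 1, not a listed power of two
    simp only [solve, solve_alt, Int.toNat_natCast, gt_iff_lt]
    rw [if_neg haux]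
    have hbne := pyBin_ne_nil m
    have hb1 := pyBin_length_bounds m hm0
    have hbin := pyBin_binary m
    have hhead := pyBin_head m hm0
    set bits := pyBin m with hbits
    set L := bits.length with hLdef
    have hL1 : 1 ≤ L := by
      rw [hLdef]
      exact List.length_pos_of_ne_nil hbne
    have hL32 : L ≤ 32 := by
      by_contra hgt
      have h1 : 2 ^ 32 ≤ 2 ^ (L - 1) := Nat.pow_le_pow_right (by norm_num) (by omega)
      have h2 : (2 : Nat) ^ 32 = 4294967296 := by norm_num
      omega
    rw [mirrorLoop_top bits (by omega)]
    simp only [PySem.List.foldl_append_singleton, List.nil_append]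
    rw [show bits.take (L / 2) = (bits.take ((L + 1) / 2)).take (L / 2) from by
      rw [List.take_take, show min (L / 2) ((L + 1) / 2) = L / 2 from by omega]]
    set pre := bits.take ((L + 1) / 2) with hpre_def
    have hpre_len : pre.length = (L + 1) / 2 := by
      rw [hpre_def, List.length_take]
      omega
    have hpre_head : pre.head? = some '1' := by
      cases hb : bits with
      | nil => exact absurd hb hbne
      | cons c bs =>
        have hc : c = '1' := by rw [hb] at hhead; simpa using hhead
        rw [hpre_def, hb, show (L + 1) / 2 = ((L + 1) / 2 - 1) + 1 from by omega,
            List.take_succ_cons, hc]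
        rfl
    have hpre_bin : ∀ c ∈ pre, c = '0' ∨ c = '1' := by
      intro c hc
      exact hbin c (List.take_subset _ _ hc)
    have hxlow : 2 ^ ((L + 1) / 2 - 1) ≤ parseBin pre := by
      have := parse_ge pre hpre_head
      rwa [hpre_len] at this
    have hxhigh : parseBin pre < 2 ^ ((L + 1) / 2) := by
      have := parse_lt pre
      rwa [hpre_len] at this
    have hparse_bits : parseBin bits = m := parse_pyBin m
    by_cases hv : (parseBin (pre ++ (pre.take (L / 2)).reverse) : Int) ≤ (m : Int)
    · rw [if_neg (not_lt.mpr hv), if_pos hv]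
    · rw [if_pos (not_le.mp hv), if_neg hv]
      have hvm : (m : Int) < (parseBin (pre ++ (pre.take (L / 2)).reverse) : Int) := not_le.mp hv
      have hL2 : 2 ≤ L := by
        by_contra hgt
        have hLeq : L = 1 := by omega
        have h1 : pre = bits := by
          rw [hpre_def, hLeq]
          exact List.take_of_length_le (by omega)
        have h2 : pre.take (L / 2) = [] := by
          rw [hLeq]
          simp
        rw [h2, List.reverse_nil, List.append_nil, h1, hparse_bits] at hvm
        omega
      -- the prefix is strictly more than a power of two
      have hxgt : 2 ^ ((L + 1) / 2 - 1) < parseBin pre := by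
        rcases Nat.lt_or_ge (2 ^ ((L + 1) / 2 - 1)) (parseBin pre) with h | h
        · exact h
        have hxeq : parseBin pre = 2 ^ ((L + 1) / 2 - 1) := by omega
        have hpre_eq : pre = '1' :: List.replicate ((L + 1) / 2 - 1) '0' := by
          have := pyBin_parse pre hpre_head hpre_bin
          rw [hxeq, pyBin_two_pow] at this
          exact this.symm
        have htk : pre.take (L / 2) = '1' :: List.replicate (L / 2 - 1) '0' := by
          rw [hpre_eq, show L / 2 = (L / 2 - 1) + 1 from by omega, List.take_succ_cons,
              List.take_replicate, show min (L / 2 - 1) ((L + 1) / 2 - 1) = L / 2 - 1 from by omega]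
          congr 1
        have hval : parseBin (pre ++ (pre.take (L / 2)).reverse) = 2 ^ (L - 1) + 1 := by
          rw [htk, List.reverse_cons, List.reverse_replicate, parse_append, parse_append, hxeq]
          rw [parse_replicate_zero]
          have hone : parseBin ['1'] = 1 := by decide
          rw [hone]
          simp only [List.length_append, List.length_replicate, List.length_cons,
            List.length_nil]
          rw [show (L / 2 - 1 + 1) = L / 2 from by omega, zero_mul, zero_add,
              ← pow_add, show ((L + 1) / 2 - 1 + L / 2) = L - 1 from by omega]
        rw [hval] at hvm
        have hm2 : m = 2 ^ (L - 1) := by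
          have h1 : (m : Int) < ((2 ^ (L - 1) + 1 : Nat) : Int) := by exact_mod_cast hvm
          have h2 : m < 2 ^ (L - 1) + 1 := by exact_mod_cast h1
          omega
        exact absurd ((aux_mem _).mpr ⟨L - 1, by omega, by omega, by
          rw [hm2]; push_cast; ring⟩) haux
      -- decompose the prefix at its last '1'
      have h1mem : '1' ∈ pre := by
        cases hp : pre with
        | nil => rw [hp] at hpre_head; simp at hpre_head
        | cons c cs =>
          have : c = '1' := by rw [hp] at hpre_head; simpa using hpre_head
          rw [this]
          exact List.mem_cons_self
      obtain ⟨q, t, hqt⟩ := split_last_one pre hpre_bin h1mem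
      have hlen_decomp : q.length + 1 + t = (L + 1) / 2 := by
        have := congrArg List.length hqt
        simp at this
        omega
      have hq_ne : q ≠ [] := by
        intro h0
        rw [h0, List.nil_append] at hqt
        have : parseBin pre = 2 ^ t := by
          rw [hqt, parse_cons, parse_replicate_zero]
          simp
        have hq0 : q.length = 0 := by rw [h0]; rfl
        have ht : t = (L + 1) / 2 - 1 := by omega
        rw [this, ht] at hxgt
        omega
      have hq_head : q.head? = some '1' := by
        cases hq : q with
        | nil => exact absurd hq hq_ne
        | cons c cs =>
          rw [hq] at hqt
          rw [hqt] at hpre_head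
          simpa using hpre_head
      have hx_eq : parseBin pre = parseBin q * 2 ^ (t + 1) + 2 ^ t := by
        rw [hqt, parse_append, parse_cons, parse_replicate_zero]
        simp
      have hx_pos : 1 ≤ parseBin pre := by
        have := Nat.one_le_two_pow (n := (L + 1) / 2 - 1)
        omega
      have hp'_parse : parseBin (q ++ '0' :: List.replicate t '1') = parseBin pre - 1 := by
        rw [parse_append, parse_cons, parse_replicate_one, hx_eq]
        have h1 : (1 : Nat) ≤ 2 ^ t := Nat.one_le_two_pow
        simp
        omega
      have hp_eq : pyBin (parseBin pre - 1) = q ++ '0' :: List.replicate t '1' := by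
        rw [← hp'_parse]
        apply pyBin_parse
        · cases hq : q with
          | nil => exact absurd hq hq_ne
          | cons c cs =>
            rw [hq] at hq_head
            simpa using hq_head
        · intro c hc
          rcases List.mem_append.mp hc with h | h
          · exact hpre_bin c (by rw [hqt]; exact List.mem_append_left _ h)
          · rcases List.mem_cons.mp h with h | h
            · left; exact h
            · right; exact List.eq_of_mem_replicate h
      -- rewrite the scan
      have hpal_len : (pre ++ (pre.take (L / 2)).reverse).length = L := by
        simp [hpre_len]
        omega
      rw [hpal_len]
      have hpal_get : ∀ i : Nat, (pre ++ (pre.take (L / 2)).reverse)[i]? =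
          if i < (L + 1) / 2 then pre[i]?
          else if i < L then pre[L - 1 - i]?
          else none := fun i => getElem?_mirror pre L i hpre_len
      have hscan : scanLoop (pre ++ (pre.take (L / 2)).reverse) 0 ((L : Int) - 1) 1
          ((L : Int) - 1 - 1) = ((q.length : Int) + 1, 0 + ((L : Int) - 1) - (q.length : Int) - 1) := by
        apply scanLoop_last _ _ L _ _ _ _ (by omega) (by omega) (by omega)
        · rw [PySem.List.pyGetD_natCast, List.getD_eq_getElem?_getD, hpal_get,
              if_pos (by omega), hqt, getElem?_mid, if_neg (by omega), if_pos rfl]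
          rfl
        · intro mi hmi1 hmi2
          have hmiN : mi = ((mi.toNat : Nat) : Int) := by omega
          rw [hmiN, PySem.List.pyGetD_natCast, List.getD_eq_getElem?_getD, hpal_get,
              if_pos (by omega), hqt, getElem?_mid, if_neg (by omega), if_neg (by omega),
              if_pos (by omega)]
          decide
      rw [hscan]
      dsimp only
      rw [show (0 : Int) + ((L : Int) - 1) - (q.length : Int) - 1 = (L : Int) - 2 - (q.length : Int) from by ring,
          show ((q.length : Int) + 1 - 1) = (q.length : Int) from by ring,
          show ((L : Int) - 2 - (q.length : Int) + 1) = (L : Int) - 1 - (q.length : Int) from by ring]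
      rw [hqt]
      rw [surgery q t L hq_ne hL2 hlen_decomp]
      -- B side
      have hcast : ((2 : Int) ^ ((L + 1) / 2 - 1)) = ((2 ^ ((L + 1) / 2 - 1) : Nat) : Int) := by
        push_cast
        ring
      have hxq : parseBin (q ++ '1' :: List.replicate t '0') = parseBin pre := by rw [hqt]
      rw [hcast, if_neg (by rw [hxq]; omega)]
      rw [show ((parseBin (q ++ '1' :: List.replicate t '0') : Int) - 1).toNat
            = parseBin (q ++ '1' :: List.replicate t '0') - 1 from by omega]
      rw [hxq]
      rw [hp_eq]

-- ===== VERDICT (by name: the statement is the Claim_ definition above) =====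
theorem solve_spec : Claim_equal_solve := by
  intro n hdom hpre
  exact main_eq n hdom hpre
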